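-- pv_equiv track=rewrite | github.com/evan555555555555555/ortholink-backend | app/crews/verify_distributor.py | _boost_india_primary_docs
-- ===== SOURCE A (Python) =====
-- def _boost_india_primary_docs(search_results: list[dict]) -> list[dict]:
--     """
--     For India queries, re-rank search results to prioritize MDR 2017 and
--     CDSCO submission format chunks over generic FAQ/guidance chunks.
--
--     MDR 2017 Schedule Fourth contains the actual mandatory document requirements.
--     FAQ addenda are supplementary — they should not outrank the primary regulation.
--     """
--     if not search_results:
--         return search_results
--
--     # Priority tiers by document_id prefix
--     _INDIA_PRIMARY = ("IN-MDR-2017", "IN_MDR_2017_FULL", "IN_CDSCO_SUBMISSION_FORMAT")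
--     _INDIA_SECONDARY = ("IN_CDSCO_MD_COMPREHENSIVE", "IN_CDSCO_FSC_GUIDANCE", "IN_CDSCO_MD_PORTAL")
--
--     def _rank(r: dict) -> int:
--         doc_id = r.get("document_id", "")
--         if any(doc_id.startswith(p) for p in _INDIA_PRIMARY):
--             return 0  # Highest priority
--         if any(doc_id.startswith(p) for p in _INDIA_SECONDARY):
--             return 1
--         return 2  # FAQ/addenda/other
--
--     # Stable sort: within same tier, preserve original FAISS score order
--     return sorted(search_results, key=_rank)
-- ===== SOURCE B (Python) =====
-- def _boost_india_primary_docs(search_results: list[dict]) -> list[dict]: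
--     """Stable one-pass 3-bucket partition instead of a comparison sort (alternative algorithm, same result)."""
--     _INDIA_PRIMARY = ("IN-MDR-2017", "IN_MDR_2017_FULL", "IN_CDSCO_SUBMISSION_FORMAT")
--     _INDIA_SECONDARY = ("IN_CDSCO_MD_COMPREHENSIVE", "IN_CDSCO_FSC_GUIDANCE", "IN_CDSCO_MD_PORTAL")
--     primary, secondary, rest = [], [], []
--     for r in search_results:
--         doc_id = r.get("document_id", "")
--         if doc_id.startswith(_INDIA_PRIMARY):
--             primary.append(r)
--         elif doc_id.startswith(_INDIA_SECONDARY):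
--             secondary.append(r)
--         else:
--             rest.append(r)
--     return primary + secondary + rest
-- ===== Notes on version B (the rewrite author's own statement) =====
-- stated objective: alternative
-- what changed: Replaces the stable sort by a 3-valued rank key with a single-pass stable bucket partition into three tier lists that are then concatenated; fewer passes asymptotically (O(n) vs O(n log n)) but not measurably faster since Python's sorted is C-implemented.
import Mathlib
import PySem

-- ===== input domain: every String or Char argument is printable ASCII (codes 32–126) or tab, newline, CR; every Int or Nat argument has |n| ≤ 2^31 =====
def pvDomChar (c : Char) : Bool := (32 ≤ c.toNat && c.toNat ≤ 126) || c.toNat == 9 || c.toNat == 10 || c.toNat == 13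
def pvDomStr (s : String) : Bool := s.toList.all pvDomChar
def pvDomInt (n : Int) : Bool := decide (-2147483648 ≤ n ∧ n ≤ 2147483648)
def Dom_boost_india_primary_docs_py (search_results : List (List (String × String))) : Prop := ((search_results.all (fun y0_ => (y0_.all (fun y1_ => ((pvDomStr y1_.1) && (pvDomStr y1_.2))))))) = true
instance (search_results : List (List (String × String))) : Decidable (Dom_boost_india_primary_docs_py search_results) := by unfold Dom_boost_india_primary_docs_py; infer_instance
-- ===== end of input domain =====

-- B replaces A's stable sort by a 3-valued rank key with a single-pass stable 3-bucket partition (alternative algorithm, same return value).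

-- ===== PORT A =====
-- shared tier predicates: r.get("document_id","").startswith(<tuple>) — identical literals in A and Source B
def pvDocId (r : List (String × String)) : String :=
  PySem.Dict.getD (PySem.Dict.mk r) "document_id" ""
def pvIsPrimary (r : List (String × String)) : Bool :=
  ["IN-MDR-2017", "IN_MDR_2017_FULL", "IN_CDSCO_SUBMISSION_FORMAT"].any
    (fun p => PySem.Str.startswith (pvDocId r) p)
def pvIsSecondary (r : List (String × String)) : Bool :=
  ["IN_CDSCO_MD_COMPREHENSIVE", "IN_CDSCO_FSC_GUIDANCE", "IN_CDSCO_MD_PORTAL"].any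
    (fun p => PySem.Str.startswith (pvDocId r) p)

-- _rank in A
def pvRank (r : List (String × String)) : Int :=
  if pvIsPrimary r then 0
  else if pvIsSecondary r then 1
  else 2

def boost_india_primary_docs_py (search_results : List (List (String × String))) : List (List (String × String)) :=
  if search_results = [] then search_results
  else PySem.List.sorted search_results pvRank false

-- ===== PORT B =====
-- the loop body of Source B: append r to the bucket of its tier
def pvBucketStep (st : List (List (String × String)) × List (List (String × String)) × List (List (String × String)))
    (r : List (String × String)) :
    List (List (String × String)) × List (List (String × String)) × List (List (String × String)) :=
  if pvIsPrimary r then (st.1 ++ [r], st.2.1, st.2.2)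
  else if pvIsSecondary r then (st.1, st.2.1 ++ [r], st.2.2)
  else (st.1, st.2.1, st.2.2 ++ [r])

def boost_india_primary_docs_py_alt (search_results : List (List (String × String))) : List (List (String × String)) :=
  let st := search_results.foldl pvBucketStep ([], [], [])
  st.1 ++ st.2.1 ++ st.2.2

-- ===== PRECONDITION & SPEC =====
def Spec_boost_india_primary_docs_py (search_results : List (List (String × String))) (out : List (List (String × String))) : Prop := out = boost_india_primary_docs_py_alt search_results
instance (search_results : List (List (String × String))) (out : List (List (String × String))) : Decidable (Spec_boost_india_primary_docs_py search_results out) := by unfold Spec_boost_india_primary_docs_py; infer_instance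

-- ===== CLAIM (what is proved, stated in full; the proofs are below) =====
def Claim_equal_boost_india_primary_docs_py : Prop := ∀ (search_results : List (List (String × String))), Dom_boost_india_primary_docs_py search_results → Spec_boost_india_primary_docs_py search_results (boost_india_primary_docs_py search_results)

-- ===== LEMMAS AND PROOFS =====

-- inserting x after an all-"false" prefix and before an all-"true" suffix
theorem pv_insertBy_split {α : Type} (before : α → α → Bool) (x : α) (a rest : List α)
    (ha : ∀ y ∈ a, before x y = false) (hr : ∀ y ∈ rest, before x y = true) :
    PySem.List.insertBy before x (a ++ rest) = a ++ x :: rest := by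
  induction a with
  | nil =>
    cases rest with
    | nil => simp [PySem.List.insertBy]
    | cons y ys => simp [PySem.List.insertBy, hr y (by simp)]
  | cons y a' ih =>
    have hy : before x y = false := ha y (by simp)
    simp only [List.cons_append, PySem.List.insertBy, hy, Bool.false_eq_true, if_false]
    simp [ih (fun z hz => ha z (by simp [hz]))]

-- the three bucket filters
def pvF0 (xs : List (List (String × String))) : List (List (String × String)) :=
  xs.filter (fun r => pvRank r = 0)
def pvF1 (xs : List (List (String × String))) : List (List (String × String)) :=
  xs.filter (fun r => pvRank r = 1)
def pvF2 (xs : List (List (String × String))) : List (List (String × String)) :=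
  xs.filter (fun r => pvRank r = 2)

theorem pvRank_cases (r : List (String × String)) : pvRank r = 0 ∨ pvRank r = 1 ∨ pvRank r = 2 := by
  unfold pvRank; split_ifs <;> simp

-- A's stable sort by pvRank is the concatenation of the three bucket filters
theorem pv_sorted_eq_buckets (xs : List (List (String × String))) :
    PySem.List.sorted xs pvRank false = pvF0 xs ++ pvF1 xs ++ pvF2 xs := by
  induction xs using List.reverseRecOn with
  | nil => simp [PySem.List.sorted, pvF0, pvF1, pvF2]
  | append_singleton xs x ih =>
    have hstep : PySem.List.sorted (xs ++ [x]) pvRank false =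
        PySem.List.insertBy (fun a b => decide (pvRank a < pvRank b)) x
          (PySem.List.sorted xs pvRank false) := by
      simp [PySem.List.sorted, List.foldl_append]
    rw [hstep, ih]
    have hf0 : pvF0 (xs ++ [x]) = pvF0 xs ++ (if pvRank x = 0 then [x] else []) := by
      simp [pvF0, List.filter_append]; split_ifs with h <;> simp [h]
    have hf1 : pvF1 (xs ++ [x]) = pvF1 xs ++ (if pvRank x = 1 then [x] else []) := by
      simp [pvF1, List.filter_append]; split_ifs with h <;> simp [h]
    have hf2 : pvF2 (xs ++ [x]) = pvF2 xs ++ (if pvRank x = 2 then [x] else []) := by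
      simp [pvF2, List.filter_append]; split_ifs with h <;> simp [h]
    have m0 : ∀ y ∈ pvF0 xs, pvRank y = 0 := by intro y hy; simpa [pvF0] using (List.of_mem_filter hy)
    have m1 : ∀ y ∈ pvF1 xs, pvRank y = 1 := by intro y hy; simpa [pvF1] using (List.of_mem_filter hy)
    have m2 : ∀ y ∈ pvF2 xs, pvRank y = 2 := by intro y hy; simpa [pvF2] using (List.of_mem_filter hy)
    rcases pvRank_cases x with h | h | h
    · have := pv_insertBy_split (fun a b => decide (pvRank a < pvRank b)) x
        (pvF0 xs) (pvF1 xs ++ pvF2 xs)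
        (by intro y hy; simp [m0 y hy, h])
        (by intro y hy; rcases List.mem_append.1 hy with hy | hy
            · simp [m1 y hy, h]
            · simp [m2 y hy, h])
      rw [List.append_assoc, this, hf0, hf1, hf2, h]
      simp
    · have := pv_insertBy_split (fun a b => decide (pvRank a < pvRank b)) x
        (pvF0 xs ++ pvF1 xs) (pvF2 xs)
        (by intro y hy; rcases List.mem_append.1 hy with hy | hy
            · simp [m0 y hy, h]
            · simp [m1 y hy, h])
        (by intro y hy; simp [m2 y hy, h])
      rw [this, hf0, hf1, hf2, h]
      simp
    · have := PySem.List.insertBy_of_forall_not_before (fun a b => decide (pvRank a < pvRank b)) x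
        (pvF0 xs ++ pvF1 xs ++ pvF2 xs)
        (by intro y hy
            rcases List.mem_append.1 hy with hy | hy
            · rcases List.mem_append.1 hy with hy | hy
              · simp [m0 y hy, h]
              · simp [m1 y hy, h]
            · simp [m2 y hy, h])
      rw [this, hf0, hf1, hf2, h]
      simp
  
-- B's fold computes the three bucket filters
theorem pv_fold_buckets (xs : List (List (String × String)))
    (a b c : List (List (String × String))) :
    xs.foldl pvBucketStep (a, b, c) = (a ++ pvF0 xs, b ++ pvF1 xs, c ++ pvF2 xs) := by
  induction xs generalizing a b c with
  | nil => simp [pvF0, pvF1, pvF2]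
  | cons x t ih =>
    simp only [List.foldl_cons]
    by_cases hP : pvIsPrimary x = true
    · have hr : pvRank x = 0 := by simp [pvRank, hP]
      simp [pvBucketStep, hP, ih, pvF0, pvF1, pvF2, pvRank]
    · by_cases hS : pvIsSecondary x = true
      · have hr : pvRank x = 1 := by simp [pvRank, hP, hS]
        simp [pvBucketStep, hP, hS, ih, pvF0, pvF1, pvF2, pvRank]
      · have hr : pvRank x = 2 := by simp [pvRank, hP, hS]
        simp [pvBucketStep, hP, hS, ih, pvF0, pvF1, pvF2, pvRank]

-- ===== VERDICT (by name: the statement is the Claim_ definition above) =====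
theorem boost_india_primary_docs_py_spec : Claim_equal_boost_india_primary_docs_py := by
  intro xs _
  show boost_india_primary_docs_py xs = boost_india_primary_docs_py_alt xs
  unfold boost_india_primary_docs_py boost_india_primary_docs_py_alt
  rw [pv_fold_buckets xs [] [] []]
  simp only [List.nil_append]
  split_ifs with h
  · subst h; simp [pvF0, pvF1, pvF2]
  · exact pv_sorted_eq_buckets xs
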